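-- pv_equiv track=rewrite | github.com/peytontolbert/Research_Library | models/mirrormind/persona.py | _infer_paper_style
-- ===== SOURCE A (Python) =====
-- from typing import Dict, List, Optional, Sequence
--
-- def _infer_paper_style(concepts: List[Dict[str, str]]) -> Dict[str, str]:
--     """
--     Heuristics for paper style:
--     - theoretical_bias: theoretical / empirical / mixed / unspecified
--     - engineering_depth: low / medium / high
--     - experimentation_pattern: ablation-heavy / single-main-result / unspecified
--     """
--     if not concepts:
--         return {}
--
--     blob_tokens: List[str] = []
--     for c in concepts:
--         txt = (c.get("summary") or c.get("doc") or c.get("code") or "").lower()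
--         blob_tokens.extend(txt.split())
--
--     tok_set = set(blob_tokens)
--     has_theory = any(t in tok_set for t in ("theorem", "lemma", "proof", "bound", "convergence"))
--     has_experiments = any(t in tok_set for t in ("experiment", "dataset", "benchmark", "accuracy", "evaluation"))
--     if has_theory and not has_experiments:
--         theoretical_bias = "theoretical"
--     elif has_experiments and not has_theory:
--         theoretical_bias = "empirical"
--     elif has_theory and has_experiments:
--         theoretical_bias = "mixed"
--     else:
--         theoretical_bias = "unspecified"
--
--     has_system = any(t in tok_set for t in ("implementation", "system", "deployment", "runtime", "throughput", "latency"))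
--     has_code = any(t in tok_set for t in ("pytorch", "tensorflow", "library", "framework"))
--     if has_system and has_code:
--         engineering_depth = "high"
--     elif has_system or has_code:
--         engineering_depth = "medium"
--     else:
--         engineering_depth = "low"
--
--     has_ablation = any("ablation" in t for t in tok_set)
--     has_sweep = any(t in tok_set for t in ("sweep", "grid-search", "hyperparameter"))
--     if has_ablation or has_sweep:
--         experimentation_pattern = "ablation-heavy"
--     elif has_experiments:
--         experimentation_pattern = "single-main-result"
--     else:
--         experimentation_pattern = "unspecified"
--
--     return {
--         "theoretical_bias": theoretical_bias,
--         "engineering_depth": engineering_depth,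
--         "experimentation_pattern": experimentation_pattern,
--     }
-- ===== SOURCE B (Python) =====
-- from typing import Dict, List
--
--
-- def _infer_paper_style(concepts: List[Dict[str, str]]) -> Dict[str, str]:
--     if not concepts:
--         return {}
--
--     theory = experiments = system = code = ablation = sweep = False
--     for c in concepts:
--         txt = (c.get("summary") or c.get("doc") or c.get("code") or "").lower()
--         for t in txt.split():
--             theory = theory or t in ("theorem", "lemma", "proof", "bound", "convergence")
--             experiments = experiments or t in ("experiment", "dataset", "benchmark", "accuracy", "evaluation")
--             system = system or t in ("implementation", "system", "deployment", "runtime", "throughput", "latency")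
--             code = code or t in ("pytorch", "tensorflow", "library", "framework")
--             ablation = ablation or "ablation" in t
--             sweep = sweep or t in ("sweep", "grid-search", "hyperparameter")
--
--     if theory and not experiments:
--         theoretical_bias = "theoretical"
--     elif experiments and not theory:
--         theoretical_bias = "empirical"
--     elif theory and experiments:
--         theoretical_bias = "mixed"
--     else:
--         theoretical_bias = "unspecified"
--
--     if system and code:
--         engineering_depth = "high"
--     elif system or code:
--         engineering_depth = "medium"
--     else:
--         engineering_depth = "low"
--
--     if ablation or sweep:
--         experimentation_pattern = "ablation-heavy"
--     elif experiments:
--         experimentation_pattern = "single-main-result"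
--     else:
--         experimentation_pattern = "unspecified"
--
--     return {
--         "theoretical_bias": theoretical_bias,
--         "engineering_depth": engineering_depth,
--         "experimentation_pattern": experimentation_pattern,
--     }
-- ===== Notes on version B (the rewrite author's own statement) =====
-- stated objective: simpler
-- what changed: Replaces building a token set followed by seven separate any()/membership scans with a single accumulating pass over the tokens that maintains six boolean flags, then applies the same classification cascades.
import Mathlib
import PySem

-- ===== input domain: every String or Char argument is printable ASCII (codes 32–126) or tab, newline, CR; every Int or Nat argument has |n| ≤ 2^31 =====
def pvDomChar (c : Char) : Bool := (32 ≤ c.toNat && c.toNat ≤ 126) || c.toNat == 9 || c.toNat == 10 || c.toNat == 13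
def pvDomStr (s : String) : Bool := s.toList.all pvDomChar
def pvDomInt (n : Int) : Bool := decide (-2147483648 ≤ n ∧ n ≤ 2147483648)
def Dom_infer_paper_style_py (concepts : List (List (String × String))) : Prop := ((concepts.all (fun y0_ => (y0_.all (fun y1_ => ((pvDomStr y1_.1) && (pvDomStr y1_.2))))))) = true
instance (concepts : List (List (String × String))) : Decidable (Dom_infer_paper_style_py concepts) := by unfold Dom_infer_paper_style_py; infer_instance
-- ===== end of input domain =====

-- B replaces A's "build a token set, then seven any()/membership scans" with one
-- accumulating pass over the tokens maintaining six boolean flags (objective: simpler).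


-- shared constant keyword tuples and the shared text-extraction expression
-- '(c.get("summary") or c.get("doc") or c.get("code") or "").lower()'
def pvKwTheory : List String := ["theorem", "lemma", "proof", "bound", "convergence"]
def pvKwExperiments : List String := ["experiment", "dataset", "benchmark", "accuracy", "evaluation"]
def pvKwSystem : List String := ["implementation", "system", "deployment", "runtime", "throughput", "latency"]
def pvKwCode : List String := ["pytorch", "tensorflow", "library", "framework"]
def pvKwSweep : List String := ["sweep", "grid-search", "hyperparameter"]

-- Python 'x or y' on an Optional[str]: None and "" are falsy
def pvOrStr (o : Option String) (y : String) : String :=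
  match o with
  | some s => if s = "" then y else s
  | none => y

def pvText (c : List (String × String)) : String :=
  PySem.Str.lower
    (pvOrStr ((PySem.Dict.mk c).get? "summary")
      (pvOrStr ((PySem.Dict.mk c).get? "doc")
        (pvOrStr ((PySem.Dict.mk c).get? "code") "")))

-- ===== PORT A =====
def infer_paper_style_py (concepts : List (List (String × String))) : List (String × String) :=
  if concepts = [] then []
  else
    let blob_tokens : List String :=
      concepts.foldl (fun acc c => acc ++ PySem.Str.split₀ (pvText c)) []
    let tok_set : PySem.Set String := PySem.Set.ofList blob_tokens
    let has_theory := pvKwTheory.any (fun t => PySem.Set.contains tok_set t)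
    let has_experiments := pvKwExperiments.any (fun t => PySem.Set.contains tok_set t)
    let theoretical_bias :=
      if has_theory && !has_experiments then "theoretical"
      else if has_experiments && !has_theory then "empirical"
      else if has_theory && has_experiments then "mixed"
      else "unspecified"
    let has_system := pvKwSystem.any (fun t => PySem.Set.contains tok_set t)
    let has_code := pvKwCode.any (fun t => PySem.Set.contains tok_set t)
    let engineering_depth :=
      if has_system && has_code then "high"
      else if has_system || has_code then "medium"
      else "low"
    -- any("ablation" in t for t in tok_set): order-independent consumption of the set
    let has_ablation := tok_set.any (fun t => PySem.Str.isIn "ablation" t)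
    let has_sweep := pvKwSweep.any (fun t => PySem.Set.contains tok_set t)
    let experimentation_pattern :=
      if has_ablation || has_sweep then "ablation-heavy"
      else if has_experiments then "single-main-result"
      else "unspecified"
    [("theoretical_bias", theoretical_bias),
     ("engineering_depth", engineering_depth),
     ("experimentation_pattern", experimentation_pattern)]

-- ===== PORT B =====
structure PvFlags where
  theory : Bool
  experiments : Bool
  system : Bool
  code : Bool
  ablation : Bool
  sweep : Bool
deriving DecidableEq, Repr

def pvStep (f : PvFlags) (t : String) : PvFlags :=
  { theory := f.theory || pvKwTheory.contains t
    experiments := f.experiments || pvKwExperiments.contains t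
    system := f.system || pvKwSystem.contains t
    code := f.code || pvKwCode.contains t
    ablation := f.ablation || PySem.Str.isIn "ablation" t
    sweep := f.sweep || pvKwSweep.contains t }

def infer_paper_style_py_alt (concepts : List (List (String × String))) : List (String × String) :=
  if concepts = [] then []
  else
    let f : PvFlags :=
      concepts.foldl (fun f c => (PySem.Str.split₀ (pvText c)).foldl pvStep f)
        ⟨false, false, false, false, false, false⟩
    let theoretical_bias :=
      if f.theory && !f.experiments then "theoretical"
      else if f.experiments && !f.theory then "empirical"
      else if f.theory && f.experiments then "mixed"
      else "unspecified"
    let engineering_depth :=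
      if f.system && f.code then "high"
      else if f.system || f.code then "medium"
      else "low"
    let experimentation_pattern :=
      if f.ablation || f.sweep then "ablation-heavy"
      else if f.experiments then "single-main-result"
      else "unspecified"
    [("theoretical_bias", theoretical_bias),
     ("engineering_depth", engineering_depth),
     ("experimentation_pattern", experimentation_pattern)]

-- ===== PRECONDITION & SPEC =====
def Spec_infer_paper_style_py (concepts : List (List (String × String))) (out : List (String × String)) : Prop := out = infer_paper_style_py_alt concepts
instance (concepts : List (List (String × String))) (out : List (String × String)) : Decidable (Spec_infer_paper_style_py concepts out) := by unfold Spec_infer_paper_style_py; infer_instance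

-- ===== CLAIM (what is proved, stated in full; the proofs are below) =====
def Claim_equal_infer_paper_style_py : Prop := ∀ (concepts : List (List (String × String))), Dom_infer_paper_style_py concepts → Spec_infer_paper_style_py concepts (infer_paper_style_py concepts)

-- ===== LEMMAS AND PROOFS =====

-- each flag after folding pvStep over a token list is: initial flag OR some token satisfies the test
theorem pvStep_foldl (toks : List String) (f : PvFlags) :
    toks.foldl pvStep f =
      ⟨f.theory || toks.any (fun t => pvKwTheory.contains t),
       f.experiments || toks.any (fun t => pvKwExperiments.contains t),
       f.system || toks.any (fun t => pvKwSystem.contains t),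
       f.code || toks.any (fun t => pvKwCode.contains t),
       f.ablation || toks.any (fun t => PySem.Str.isIn "ablation" t),
       f.sweep || toks.any (fun t => pvKwSweep.contains t)⟩ := by
  induction toks generalizing f with
  | nil => simp
  | cons t ts ih =>
    simp only [List.foldl_cons, ih, List.any_cons, pvStep, Bool.or_assoc]

-- B's nested fold over concepts equals folding pvStep over the concatenated token list
theorem pvStep_foldl_concepts (concepts : List (List (String × String))) (f : PvFlags) :
    concepts.foldl (fun f c => (PySem.Str.split₀ (pvText c)).foldl pvStep f) f =
      (concepts.foldl (fun acc c => acc ++ PySem.Str.split₀ (pvText c)) []).foldl pvStep f := by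
  rw [PySem.List.foldl_append_eq_flatMap]
  simp only [List.nil_append]
  induction concepts generalizing f with
  | nil => simp
  | cons c cs ih => simp [List.foldl_append, ih]

-- 'any keyword is in set(toks)' is 'some token is a keyword'
theorem pvAny_set (kws toks : List String) :
    kws.any (fun t => PySem.Set.contains (PySem.Set.ofList toks) t) =
      toks.any (fun t => kws.contains t) := by
  rw [Bool.eq_iff_iff]
  simp only [List.any_eq_true, PySem.Set.contains_iff, PySem.Set.mem_ofList,
    List.contains_iff_mem]
  exact ⟨fun ⟨t, h1, h2⟩ => ⟨t, h2, h1⟩, fun ⟨t, h1, h2⟩ => ⟨t, h2, h1⟩⟩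

-- a predicate-any over set(toks) is the same any over toks
theorem pvAny_set_pred (toks : List String) (p : String → Bool) :
    (PySem.Set.ofList toks).any p = toks.any p := by
  rw [Bool.eq_iff_iff]
  simp only [List.any_eq_true, PySem.Set.mem_ofList]

-- ===== VERDICT (by name: the statement is the Claim_ definition above) =====
theorem infer_paper_style_py_spec : Claim_equal_infer_paper_style_py := by
  intro concepts _
  show infer_paper_style_py concepts = infer_paper_style_py_alt concepts
  unfold infer_paper_style_py infer_paper_style_py_alt
  by_cases h : concepts = []
  · simp [h]
  · rw [if_neg h, if_neg h, pvStep_foldl_concepts, pvStep_foldl]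
    simp only [pvAny_set, pvAny_set_pred, Bool.false_or]
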